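-- pv_equiv track=rewrite | github.com/chlendyd7/Algorithm | 리뉴얼/2025/1/sec/8/practice/110 옮기기.py | find_110s
-- ===== SOURCE A (Python) =====
-- def find_110s(string):
--     temp = ''
--     cnt = 0
--
--     for char in string:
--         temp += char
--         while len(temp) > 2 and temp[-3:] == '110':
--             temp = temp[:-3]
--             cnt += 1
--     return temp, cnt
-- ===== SOURCE B (Python) =====
-- def find_110s(string):
--     # Fixpoint of global replacement: since occurrences of '110' never overlap,
--     # deleting '110' is a confluent rewriting system, so repeatedly stripping
--     # ALL occurrences in one replace() pass reaches the same normal form and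
--     # removal count as any other removal order (each removal drops 3 chars).
--     cnt = 0
--     while '110' in string:
--         shorter = string.replace('110', '')
--         cnt += (len(string) - len(shorter)) // 3
--         string = shorter
--     return string, cnt
-- ===== Notes on version B (the rewrite author's own statement) =====
-- stated objective: faster
-- what changed: Replaces the char-by-char accumulation with a suffix-trimming while loop by a fixpoint of whole-string replace passes: strip ALL non-overlapping '110' occurrences at once and add the length difference divided by 3 to the count, repeating until none remain; correct because '110' has no self-overlap, so deletion order cannot change the normal form or the removal count.
import Mathlib
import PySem

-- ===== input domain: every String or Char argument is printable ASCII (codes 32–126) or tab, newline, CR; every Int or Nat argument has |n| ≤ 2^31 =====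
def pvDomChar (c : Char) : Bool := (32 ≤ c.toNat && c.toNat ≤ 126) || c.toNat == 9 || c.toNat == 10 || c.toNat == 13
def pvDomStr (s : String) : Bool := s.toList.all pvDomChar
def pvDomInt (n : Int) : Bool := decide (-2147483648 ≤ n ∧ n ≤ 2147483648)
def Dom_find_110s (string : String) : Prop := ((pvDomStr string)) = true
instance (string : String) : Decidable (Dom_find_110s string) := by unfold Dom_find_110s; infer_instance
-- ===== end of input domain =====

-- B replaces A's char-by-char suffix-trimming accumulation by a fixpoint of whole-string replace passes (delete all non-overlapping '110' at once, repeat); equal because '110' has no self-overlap, so deletion order does not matter.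


-- ===== PORT A =====
-- A's inner while loop: while len(temp) > 2 and temp[-3:] == '110': temp = temp[:-3]; cnt += 1
def pvAWhile (temp : List Char) (cnt : Int) : List Char × Int :=
  if h : temp.length > 2 ∧ PySem.List.slice temp (some (-3)) none = ['1', '1', '0'] then
    pvAWhile (PySem.List.slice temp none (some (-3))) (cnt + 1)
  else (temp, cnt)
termination_by temp.length
decreasing_by
  rw [PySem.List.slice_to_neg_ofNat temp 3 (by omega)]
  simp only [List.length_take]
  omega

def find_110s (string : String) : String × Int :=
  let r := string.toList.foldl (fun (s : List Char × Int) char => pvAWhile (s.1 ++ [char]) s.2) ([], 0)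
  (String.ofList r.1, r.2)

-- ===== PORT B =====
-- Proof-free characterization of one replace('110','') pass, needed by the port's termination proof.
def pvRep : List Char → List Char
  | [] => []
  | c :: t => if (['1', '1', '0'] : List Char).isPrefixOf (c :: t) then pvRep (t.drop 2) else c :: pvRep t
termination_by l => l.length
decreasing_by all_goals (simp; try omega)

def pvNRep : List Char → Nat
  | [] => 0
  | c :: t => if (['1', '1', '0'] : List Char).isPrefixOf (c :: t) then pvNRep (t.drop 2) + 1 else pvNRep t
termination_by l => l.length
decreasing_by all_goals (simp; try omega)

theorem pvGo_eq (fuel : Nat) (l acc : List Char) (h : l.length ≤ fuel) :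
    PySem.Chars.replace.go ['1', '1', '0'] [] fuel l acc = acc.reverse ++ pvRep l := by
  induction fuel generalizing l acc with
  | zero =>
      have : l = [] := List.length_eq_zero_iff.mp (Nat.le_zero.mp h)
      subst this
      simp [PySem.Chars.replace.go, pvRep]
  | succ fuel ih =>
      cases l with
      | nil => simp [PySem.Chars.replace.go, pvRep]
      | cons c t =>
          rw [PySem.Chars.replace.go, pvRep]
          by_cases hp : (['1', '1', '0'] : List Char).isPrefixOf (c :: t)
          · rw [if_pos hp, if_pos hp]
            have hd : List.drop (['1', '1', '0'] : List Char).length (c :: t) = t.drop 2 := by simp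
            have hlen : (t.drop 2).length ≤ fuel := by
              simp only [List.length_drop, List.length_cons] at *
              omega
            rw [hd, ih (t.drop 2) _ hlen]
            simp
          · rw [if_neg hp, if_neg hp]
            have hlen : t.length ≤ fuel := by
              simp only [List.length_cons] at h
              omega
            rw [ih t (c :: acc) hlen]
            simp

theorem pvReplace_eq (l : List Char) :
    PySem.Chars.replace l ['1', '1', '0'] [] = pvRep l := by
  rw [PySem.Chars.replace]
  rw [if_neg (by simp)]
  simpa using pvGo_eq l.length l [] le_rfl

theorem pvRep_length (l : List Char) : (pvRep l).length + 3 * pvNRep l = l.length := by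
  fun_induction pvRep l with
  | case1 => simp [pvNRep]
  | case2 c t hp ih =>
      rw [pvNRep, if_pos hp]
      rcases List.isPrefixOf_iff_prefix.mp hp with ⟨r, hr⟩
      have hr' : t.drop 2 = r := by
        have := congrArg (List.drop 3) hr
        simpa using this.symm
      rw [hr'] at ih
      have hl : (c :: t).length = r.length + 3 := by
        rw [← hr]; simp
      rw [hr']
      omega
  | case3 c t hp ih =>
      rw [pvNRep, if_neg hp]
      simp only [List.length_cons]
      omega

theorem pvNRep_pos (l : List Char) (h : (['1', '1', '0'] : List Char) <:+: l) :
    1 ≤ pvNRep l := by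
  fun_induction pvNRep l with
  | case1 => exact absurd h.length_le (by decide)
  | case2 c t hp ih => omega
  | case3 c t hp ih =>
      rcases List.infix_cons_iff.mp h with hpre | hinf
      · exact absurd (List.isPrefixOf_iff_prefix.mpr hpre) hp
      · exact ih hinf

-- Source B's while loop: while '110' in string: shorter = string.replace('110',''); cnt += (len-len')//3; string = shorter
def pvBLoop (s : List Char) (cnt : Int) : List Char × Int :=
  if PySem.Chars.isIn ['1', '1', '0'] s = true then
    pvBLoop (PySem.Chars.replace s ['1', '1', '0'] [])
      (cnt + PySem.Int.floordiv ((s.length : Int)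
        - ((PySem.Chars.replace s ['1', '1', '0'] []).length : Int)) 3)
  else (s, cnt)
termination_by s.length
decreasing_by
  rw [pvReplace_eq]
  have h1 := pvRep_length s
  have h2 := pvNRep_pos s ((PySem.Chars.isIn_iff_infix _ _).mp (by assumption))
  omega

def find_110s_alt (string : String) : String × Int :=
  let r := pvBLoop string.toList 0
  (String.ofList r.1, r.2)

-- ===== PRECONDITION & SPEC =====
def Spec_find_110s (string : String) (out : String × Int) : Prop := out = find_110s_alt string
instance (string : String) (out : String × Int) : Decidable (Spec_find_110s string out) := by unfold Spec_find_110s; infer_instance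

-- ===== CLAIM (what is proved, stated in full; the proofs are below) =====
def Claim_equal_find_110s : Prop := ∀ (string : String), Dom_find_110s string → Spec_find_110s string (find_110s string)

-- ===== LEMMAS AND PROOFS =====

-- proof-side reference machine: the one-pass stack reduction (head of the list = top of the stack)
def pvStkAux (st : List Char) (cnt : Int) (ch : Char) : List Char × Int :=
  match st with
  | top :: snd :: rest =>
      if ch = '0' ∧ top = '1' ∧ snd = '1' then (rest, cnt + 1)
      else (ch :: st, cnt)
  | _ => (ch :: st, cnt)

def pvStk (s : List Char × Int) (ch : Char) : List Char × Int :=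
  pvStkAux s.1 s.2 ch

-- invariant: the (reversed) stack contains no reversed "110", i.e. no ['0','1','1'] infix
def pvGood (rev : List Char) : Prop := ¬ (['0', '1', '1'] <:+: rev)

theorem pvGood_nil : pvGood [] := by
  intro h
  simpa using h.length_le

theorem pvInfix_cons (rev : List Char) (ch : Char) (hg : pvGood rev)
    (h : ['0', '1', '1'] <:+: ch :: rev) : ch = '0' ∧ ∃ rest, rev = '1' :: '1' :: rest := by
  rcases List.infix_cons_iff.mp h with hpre | hinf
  · rcases hpre with ⟨t, ht⟩
    simp only [List.cons_append, List.cons.injEq] at ht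
    exact ⟨ht.1.symm, t, ht.2.symm⟩
  · exact absurd hinf hg

theorem pvGood_tail (rest : List Char) (hg : pvGood ('1' :: '1' :: rest)) : pvGood rest :=
  fun hi => hg (List.infix_append_of_infix_right (l₂ := ['1', '1']) hi)

theorem pvGood_step (rev : List Char) (cnt : Int) (ch : Char) (hg : pvGood rev) :
    pvGood (pvStk (rev, cnt) ch).1 := by
  rcases rev with _ | ⟨top, _ | ⟨snd, rest⟩⟩
  · intro hinf
    simp only [pvStk, pvStkAux] at hinf
    obtain ⟨-, r, heq⟩ := pvInfix_cons [] ch pvGood_nil hinf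
    simp at heq
  · intro hinf
    simp only [pvStk, pvStkAux] at hinf
    obtain ⟨-, r, heq⟩ := pvInfix_cons [top] ch (by intro h; simpa using h.length_le) hinf
    simp at heq
  · simp only [pvStk, pvStkAux]
    split_ifs with hc
    · obtain ⟨-, h1, h2⟩ := hc
      subst h1; subst h2
      exact pvGood_tail rest hg
    · intro hinf
      obtain ⟨h0, r, heq⟩ := pvInfix_cons _ ch hg hinf
      cases heq
      exact hc ⟨h0, rfl, rfl⟩

-- A's while loop does nothing on a stack satisfying the invariant
theorem pvAWhile_stop (rev : List Char) (cnt : Int) (hg : pvGood rev) :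
    pvAWhile rev.reverse cnt = (rev.reverse, cnt) := by
  rw [pvAWhile]
  rw [dif_neg]
  rintro ⟨hlen, hsl⟩
  rw [PySem.List.slice_from_neg_ofNat rev.reverse 3 (by omega)] at hsl
  rw [List.drop_reverse] at hsl
  simp only [List.length_reverse] at hlen hsl
  have h3 : rev.length - (rev.length - 3) = 3 := by omega
  rw [h3] at hsl
  apply hg
  have htake : rev.take 3 = ['0', '1', '1'] := by
    have := congrArg List.reverse hsl
    simpa using this
  exact htake ▸ (rev.take_prefix 3).isInfix

-- one char of A's loop = one pvStk, on a good stack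
theorem pvStep_eq (rev : List Char) (cnt : Int) (ch : Char) (hg : pvGood rev) :
    pvAWhile (rev.reverse ++ [ch]) cnt = ((pvStk (rev, cnt) ch).1.reverse, (pvStk (rev, cnt) ch).2) := by
  have hpush : ∀ (hn : ¬ (['0', '1', '1'] <:+: ch :: rev)),
      pvAWhile (rev.reverse ++ [ch]) cnt = ((ch :: rev).reverse, cnt) := by
    intro hn
    have hsh : (rev.reverse ++ [ch] : List Char) = (ch :: rev).reverse := by simp
    rw [hsh]
    exact pvAWhile_stop _ cnt hn
  rcases rev with _ | ⟨top, _ | ⟨snd, rest⟩⟩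
  · simpa [pvStk, pvStkAux] using hpush (by intro h; simpa using h.length_le)
  · simpa [pvStk, pvStkAux] using hpush (by intro h; simpa using h.length_le)
  · simp only [pvStk, pvStkAux]
    split_ifs with hc
    · obtain ⟨h0, h1, h2⟩ := hc
      subst h0; subst h1; subst h2
      rw [pvAWhile]
      rw [dif_pos]
      · rw [PySem.List.slice_to_neg_ofNat _ 3 (by omega)]
        have hsh : (('1' :: '1' :: rest).reverse ++ ['0'] : List Char)
            = rest.reverse ++ ['1', '1', '0'] := by simp
        rw [hsh]
        have hlen : (rest.reverse ++ ['1', '1', '0'] : List Char).length = rest.length + 3 := by simp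
        have htk : (rest.reverse ++ ['1', '1', '0'] : List Char).take (rest.length + 3 - 3)
            = rest.reverse := by simp
        rw [hlen, htk]
        simpa using pvAWhile_stop rest (cnt + 1) (pvGood_tail rest hg)
      · refine ⟨by simp, ?_⟩
        rw [PySem.List.slice_from_neg_ofNat _ 3 (by omega)]
        have hsh : (('1' :: '1' :: rest).reverse ++ ['0'] : List Char)
            = rest.reverse ++ ['1', '1', '0'] := by simp
        rw [hsh]
        simp
    · apply hpush
      intro hinf
      obtain ⟨h0, r, heq⟩ := pvInfix_cons _ ch hg hinf
      cases heq
      exact hc ⟨h0, rfl, rfl⟩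

theorem pvFold_eq (cs : List Char) (rev : List Char) (cnt : Int) (hg : pvGood rev) :
    cs.foldl (fun (s : List Char × Int) char => pvAWhile (s.1 ++ [char]) s.2) (rev.reverse, cnt)
      = ((cs.foldl pvStk (rev, cnt)).1.reverse, (cs.foldl pvStk (rev, cnt)).2) := by
  induction cs generalizing rev cnt with
  | nil => simp
  | cons ch cs ih =>
      simp only [List.foldl_cons]
      rw [pvStep_eq rev cnt ch hg]
      have := ih (pvStk (rev, cnt) ch).1 (pvStk (rev, cnt) ch).2 (pvGood_step rev cnt ch hg)
      simpa using this

-- the stack step's count only shifts: the resulting stack ignores the running count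
theorem pvStk_shift (st : List Char) (c d : Int) (ch : Char) :
    pvStk (st, c + d) ch = ((pvStk (st, c) ch).1, (pvStk (st, c) ch).2 + d) := by
  rcases st with _ | ⟨top, _ | ⟨snd, rest⟩⟩
  · rfl
  · rfl
  · simp only [pvStk, pvStkAux]
    split_ifs <;> (simp; try omega)

-- consuming a '110' redex returns the stack unchanged and bumps the count
theorem pvStk_redex (st : List Char) (c : Int) (rest : List Char) :
    List.foldl pvStk (st, c) ('1' :: '1' :: '0' :: rest) = List.foldl pvStk (st, c + 1) rest := by
  have h1 : ∀ (st' : List Char) (c' : Int), pvStk (st', c') '1' = ('1' :: st', c') := by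
    intro st' c'
    rcases st' with _ | ⟨top, _ | ⟨snd, r⟩⟩
    · rfl
    · rfl
    · simp only [pvStk, pvStkAux]
      rw [if_neg]
      rintro ⟨h, -⟩
      exact absurd h (by decide)
  have h2 : pvStk ('1' :: '1' :: st, c) '0' = (st, c + 1) := by
    simp [pvStk, pvStkAux]
  simp only [List.foldl_cons, h1, h2]

-- one replace pass preserves the stack machine's final state (count shifted by the removals)
theorem pvFold_rep (l : List Char) (st : List Char) (c : Int) :
    List.foldl pvStk (st, c) l = List.foldl pvStk (st, c + (pvNRep l : Int)) (pvRep l) := by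
  fun_induction pvRep l generalizing st c with
  | case1 => simp [pvNRep]
  | case2 ch t hp ih =>
      rcases List.isPrefixOf_iff_prefix.mp hp with ⟨r, hr⟩
      have hr' : t.drop 2 = r := by
        have := congrArg (List.drop 3) hr
        simpa using this.symm
      have hl : ch :: t = '1' :: '1' :: '0' :: r := by
        rw [← hr]; rfl
      rw [hr'] at ih
      rw [hl, pvStk_redex, ih]
      rw [← hl, pvNRep, if_pos hp, hr']
      have hc : c + 1 + (pvNRep r : Int) = c + ((pvNRep r + 1 : Nat) : Int) := by
        push_cast
        omega
      rw [hc]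
  | case3 ch t hp ih =>
      rw [pvNRep, if_neg hp]
      simp only [List.foldl_cons]
      rw [pvStk_shift st c (pvNRep t) ch]
      have := ih (pvStk (st, c) ch).1 (pvStk (st, c) ch).2
      simpa using this

-- on a string with no '110' the stack machine just reverses it onto the stack
theorem pvFold_noredex (l : List Char) (done : List Char) (c : Int)
    (h : ¬ ((['1', '1', '0'] : List Char) <:+: done ++ l)) :
    List.foldl pvStk (done.reverse, c) l = ((done ++ l).reverse, c) := by
  induction l generalizing done with
  | nil => simp
  | cons ch t ih =>
      simp only [List.foldl_cons]
      have hstep : pvStk (done.reverse, c) ch = ((done ++ [ch]).reverse, c) := by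
        rcases hd : done.reverse with _ | ⟨top, _ | ⟨snd, rest⟩⟩
        · simp [pvStk, pvStkAux, hd]
        · simp [pvStk, pvStkAux, hd]
        · simp only [pvStk, pvStkAux]
          rw [if_neg]
          · simp [hd]
          · rintro ⟨h0, h1, h2⟩
            subst h0; subst h1; subst h2
            apply h
            have hdone : done = rest.reverse ++ ['1', '1'] := by
              have := congrArg List.reverse hd
              simpa using this
            exact ⟨rest.reverse, t, by simp [hdone]⟩
      rw [hstep]
      have := ih (done ++ [ch]) (by simpa using h)
      simpa using this

-- Source B's loop computes exactly the stack machine's result (string un-reversed)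
theorem pvBLoop_eq (s : List Char) (c : Int) :
    List.foldl pvStk ([], c) s = ((pvBLoop s c).1.reverse, (pvBLoop s c).2) := by
  fun_induction pvBLoop s c with
  | case1 s c hin ih =>
      rw [pvFold_rep s [] c]
      have hco : c + (pvNRep s : Int)
          = c + PySem.Int.floordiv ((s.length : Int) - ((PySem.Chars.replace s ['1', '1', '0'] []).length : Int)) 3 := by
        rw [pvReplace_eq]
        have hlen := pvRep_length s
        have h3 : (s.length : Int) - ((pvRep s).length : Int) = 3 * (pvNRep s : Int) := by
          have := pvRep_length s
          omega
        rw [h3, PySem.Int.floordiv_eq_ediv_of_pos (by omega), Int.mul_ediv_cancel_left _ (by omega)]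
      rw [pvReplace_eq] at ih
      rw [hco, pvReplace_eq] at *
      exact ih
  | case2 s c hin =>
      have hni : ¬ ((['1', '1', '0'] : List Char) <:+: s) := by
        exact (PySem.Chars.isIn_eq_false_iff _ _).mp (by simpa using hin)
      simpa using pvFold_noredex s [] c (by simpa using hni)

-- ===== VERDICT (by name: the statement is the Claim_ definition above) =====
theorem find_110s_spec : Claim_equal_find_110s := by
  intro s _
  unfold Spec_find_110s find_110s find_110s_alt
  have hA := pvFold_eq s.toList [] 0 pvGood_nil
  simp only [List.reverse_nil] at hA
  rw [hA]
  have hB := pvBLoop_eq s.toList 0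
  rw [hB]
  simp
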